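-- pv_equiv track=rewrite | github.com/timdeng2/FantasyBballOptimizer | fantasy.py | combinations_without_repeats
-- ===== SOURCE A (Python) =====
-- def combinations_without_repeats(lists):
--     if not lists:
--         return [[]]
--     first, *rest = lists
--     combinations_rest = combinations_without_repeats(rest)
--     result = []
--     for elem in first:
--         for combination in combinations_rest:
--             if elem not in combination:
--                 result.append([elem, *combination])
--     return result
-- ===== SOURCE B (Python) =====
-- def combinations_without_repeats(lists):
--     # Iterative, front-to-back: grow prefixes left to right, extending each
--     # prefix only by elements it does not already contain (A recurses on the
--     # tail and prepends, building combinations back-to-front).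
--     combos = [[]]
--     for lst in lists:
--         combos = [c + [x] for c in combos for x in lst if x not in c]
--     return combos
-- ===== Notes on version B (the rewrite author's own statement) =====
-- stated objective: alternative
-- what changed: Replaces A's backward recursion (recurse on the tail, then prepend each head element to the suffix combinations it is absent from) by an iterative forward fold that grows prefixes left to right, extending each prefix only by elements not already in it.
import Mathlib
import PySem

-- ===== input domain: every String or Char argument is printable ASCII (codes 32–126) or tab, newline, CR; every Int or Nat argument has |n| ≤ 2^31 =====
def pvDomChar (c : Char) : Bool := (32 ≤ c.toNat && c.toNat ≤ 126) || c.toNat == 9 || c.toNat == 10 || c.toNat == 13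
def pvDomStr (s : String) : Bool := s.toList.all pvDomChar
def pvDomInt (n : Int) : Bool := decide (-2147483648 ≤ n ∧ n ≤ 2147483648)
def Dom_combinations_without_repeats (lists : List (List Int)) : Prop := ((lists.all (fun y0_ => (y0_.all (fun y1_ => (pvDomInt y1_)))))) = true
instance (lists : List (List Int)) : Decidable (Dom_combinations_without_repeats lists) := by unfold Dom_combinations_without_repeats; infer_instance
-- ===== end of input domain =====

-- ===== PORT A =====
-- A: recursion on the list of lists, pruning 'elem in combination' early.
def combinations_without_repeats : List (List Int) → List (List Int)
  | [] => [[]]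
  | first :: rest =>
    let combinations_rest := combinations_without_repeats rest
    first.foldl
      (fun result elem =>
        combinations_rest.foldl
          (fun result combination =>
            if combination.contains elem then result else result ++ [elem :: combination])
          result)
      []

-- ===== PORT B =====
-- B (Source B): iterative forward fold growing prefixes left to right, extending
-- each prefix only by elements it does not already contain.
def combinations_without_repeats_alt (lists : List (List Int)) : List (List Int) :=
  lists.foldl
    (fun combos lst =>
      combos.flatMap (fun c => (lst.filter (fun x => !c.contains x)).map (fun x => c ++ [x])))
    [[]]

-- ===== PRECONDITION & SPEC =====
def Spec_combinations_without_repeats (lists : List (List Int)) (out : List (List Int)) : Prop := out = combinations_without_repeats_alt lists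
instance (lists : List (List Int)) (out : List (List Int)) : Decidable (Spec_combinations_without_repeats lists out) := by unfold Spec_combinations_without_repeats; infer_instance

-- ===== CLAIM (what is proved, stated in full; the proofs are below) =====
def Claim_equal_combinations_without_repeats : Prop := ∀ (lists : List (List Int)), Dom_combinations_without_repeats lists → Spec_combinations_without_repeats lists (combinations_without_repeats lists)

-- ===== LEMMAS AND PROOFS =====

/-- The Cartesian product as a foldr (right-nested). -/
def pvCart (lists : List (List Int)) : List (List Int) :=
  lists.foldr (fun lst acc => lst.flatMap (fun x => acc.map (fun p => x :: p))) [[]]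

/-- `t` has no repeats and is disjoint from `seen`. -/
def pvAllDistinct : List Int → List Int → Bool
  | [], _ => true
  | x :: xs, seen => if seen.contains x then false else pvAllDistinct xs (seen ++ [x])

lemma pvAllDistinct_iff (t seen : List Int) :
    pvAllDistinct t seen = true ↔ t.Nodup ∧ ∀ x ∈ t, x ∉ seen := by
  induction t generalizing seen with
  | nil => simp [pvAllDistinct]
  | cons a t ih =>
    simp only [pvAllDistinct, List.nodup_cons]
    by_cases h : seen.contains a
    · simp only [h, if_true]
      constructor
      · intro hf; cases hf
      · rintro ⟨_, hall⟩
        exact absurd (List.mem_of_elem_eq_true h) (hall a (by simp))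
    · rw [if_neg (by simpa using h)]
      rw [ih]
      have hna : a ∉ seen := fun hm => h (List.elem_eq_true_of_mem hm)
      constructor
      · rintro ⟨hnd, hall⟩
        refine ⟨⟨fun hm => (hall a hm (by simp)), hnd⟩, ?_⟩
        intro x hx
        rcases List.mem_cons.mp hx with rfl | hx
        · exact hna
        · intro hs; exact hall x hx (by simp [hs])
      · rintro ⟨⟨hat, hnd⟩, hall⟩
        refine ⟨hnd, ?_⟩
        intro x hx hs
        simp only [List.mem_append, List.mem_singleton] at hs
        rcases hs with hs | hs
        · exact hall x (by simp [hx]) hs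
        · subst hs; exact hat hx

lemma pvAllDistinct_cons_nil (e : Int) (a : List Int) :
    pvAllDistinct (e :: a) [] = (!a.contains e && pvAllDistinct a []) := by
  rw [Bool.eq_iff_iff]
  simp only [Bool.and_eq_true, Bool.not_eq_true', pvAllDistinct_iff, List.nodup_cons,
    List.contains_eq_mem, decide_eq_false_iff_not]
  constructor
  · rintro ⟨⟨hec, hnd⟩, _⟩
    exact ⟨hec, hnd, by simp⟩
  · rintro ⟨hec, hnd, _⟩
    exact ⟨⟨hec, hnd⟩, by simp⟩

lemma inner_foldl (e : Int) (cr acc : List (List Int)) :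
    cr.foldl (fun res c => if c.contains e then res else res ++ [e :: c]) acc
      = acc ++ ((cr.filter (fun c => !c.contains e)).map (fun c => e :: c)) := by
  induction cr generalizing acc with
  | nil => simp
  | cons c cr ih =>
    simp only [List.contains_eq_mem, decide_eq_true_eq] at ih ⊢
    simp only [List.foldl_cons, List.filter_cons]
    by_cases h : e ∈ c
    · simp [h, ih]
    · simp [h, ih]

lemma filter_flatMap {α β : Type} (l : List α) (g : α → List β) (p : β → Bool) :
    (l.flatMap g).filter p = l.flatMap (fun x => (g x).filter p) := by
  induction l with
  | nil => rfl
  | cons a l ih => simp [List.flatMap_cons, List.filter_append, ih]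

lemma flatMap_filter {α β : Type} (l : List α) (q : α → Bool) (f : α → List β) :
    (l.filter q).flatMap f = l.flatMap (fun x => if q x then f x else []) := by
  induction l with
  | nil => rfl
  | cons a l ih =>
    by_cases h : q a
    · simp [h, ih]
    · simp [h, ih]

/-- A computes exactly the distinct-element tuples of the Cartesian product, in order. -/
lemma A_eq_filter_cart (lists : List (List Int)) :
    combinations_without_repeats lists = (pvCart lists).filter (fun c => pvAllDistinct c []) := by
  induction lists with
  | nil => simp [combinations_without_repeats, pvCart, pvAllDistinct]
  | cons first rest ih =>
    show first.foldl _ [] = _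
    have hcart : pvCart (first :: rest)
        = first.flatMap (fun e => (pvCart rest).map (fun p => e :: p)) := rfl
    rw [hcart, filter_flatMap]
    simp only [inner_foldl, ih]
    rw [PySem.List.foldl_append_eq_flatMap]
    simp only [List.nil_append]
    congr 1
    funext e
    rw [List.filter_map, List.filter_filter]
    congr 1
    apply List.filter_congr
    intro a _
    simp only [Function.comp]
    exact (pvAllDistinct_cons_nil e a).symm

/-- Invariant of B's forward fold, generalized over the accumulated prefixes. -/
lemma B_fold_eq (lists : List (List Int)) (acc : List (List Int)) :
    lists.foldl
        (fun combos lst =>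
          combos.flatMap (fun c => (lst.filter (fun x => !c.contains x)).map (fun x => c ++ [x])))
        acc
      = acc.flatMap (fun c => ((pvCart lists).filter (fun t => pvAllDistinct t c)).map (fun t => c ++ t)) := by
  induction lists generalizing acc with
  | nil => simp [pvCart, pvAllDistinct]
  | cons l rest ih =>
    rw [List.foldl_cons, ih]
    rw [List.flatMap_assoc]
    congr 1
    funext c
    have hcart : pvCart (l :: rest)
        = l.flatMap (fun x => (pvCart rest).map (fun p => x :: p)) := rfl
    rw [List.flatMap_map, flatMap_filter]
    rw [hcart, filter_flatMap, List.map_flatMap]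
    congr 1
    funext x
    by_cases hx : x ∈ c
    · simp [pvAllDistinct, hx, List.filter_map, Function.comp]
    · simp [List.filter_map, Function.comp_def, pvAllDistinct, hx, List.append_assoc]

lemma B_eq_filter_cart (lists : List (List Int)) :
    combinations_without_repeats_alt lists = (pvCart lists).filter (fun c => pvAllDistinct c []) := by
  unfold combinations_without_repeats_alt
  rw [B_fold_eq]
  simp

-- ===== VERDICT (by name: the statement is the Claim_ definition above) =====
theorem combinations_without_repeats_spec : Claim_equal_combinations_without_repeats := by
  intro lists _
  unfold Spec_combinations_without_repeats
  rw [A_eq_filter_cart, B_eq_filter_cart]
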